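-- pv_equiv track=rewrite | github.com/davidism/advent | src/advent/year2020/day14.py | v2_mask
-- ===== SOURCE A (Python) =====
-- def v2_mask(mask, addr):
--     value = bin(addr)[2:].zfill(36)
--     builds = [[]]
--
--     for mc, vc in zip(mask, value):
--         if mc == "0":
--             for b in builds:
--                 b.append(vc)
--         elif mc == "1":
--             for b in builds:
--                 b.append("1")
--         else:
--             new_builds = []
--
--             for b in builds:
--                 new_b = b.copy()
--                 new_b.append("1")
--                 new_builds.append(new_b)
--                 b.append("0")
--
--             builds.extend(new_builds)
--
--     for b in builds:
--         yield int("".join(b), 2)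
-- ===== SOURCE B (Python) =====
-- def v2_mask(mask, addr):
--     value = bin(addr)[2:].zfill(36)
--     bits = []
--     floats = []
--     for mc, vc in zip(mask, value):
--         if mc == "0":
--             bits.append(vc)
--         elif mc == "1":
--             bits.append("1")
--         else:
--             floats.append(len(bits))
--             bits.append("0")
--     for c in range(1 << len(floats)):
--         b = list(bits)
--         for j, pos in enumerate(floats):
--             if (c >> j) & 1:
--                 b[pos] = "1"
--         yield int("".join(b), 2)
-- ===== Notes on version B (the rewrite author's own statement) =====
-- stated objective: alternative
-- what changed: B builds the fixed base bit-list and the list of floating positions once, then enumerates all variants with a single counter over range(2**len(floats)), setting floating bit j from counter bit j (earliest floating position = lowest bit, reproducing A's order), instead of A's progressive doubling of a list of partial builds at every 'X'.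
import Mathlib
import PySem

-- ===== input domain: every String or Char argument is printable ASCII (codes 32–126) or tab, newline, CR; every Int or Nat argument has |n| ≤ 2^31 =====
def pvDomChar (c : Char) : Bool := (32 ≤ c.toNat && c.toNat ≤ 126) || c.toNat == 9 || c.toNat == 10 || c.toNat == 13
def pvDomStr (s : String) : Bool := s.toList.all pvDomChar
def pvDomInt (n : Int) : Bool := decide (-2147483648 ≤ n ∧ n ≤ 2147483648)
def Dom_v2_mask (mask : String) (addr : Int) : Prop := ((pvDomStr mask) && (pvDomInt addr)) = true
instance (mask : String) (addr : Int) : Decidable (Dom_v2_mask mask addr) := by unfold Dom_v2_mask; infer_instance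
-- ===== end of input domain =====

-- B enumerates the floating-bit combinations with a single counter over a fixed base bit-list
-- (earliest floating position = lowest counter bit) instead of A's progressive doubling of
-- partial builds; same values in the same order.


-- ===== PORT A =====
-- shared transliterations of lines textually identical in Source A and Source B:
-- value = bin(addr)[2:].zfill(36)   (the '[2:]' slice is List.drop 2: bin() always yields ≥ 3 chars)
def pvValue (addr : Int) : List Char :=
  PySem.Chars.zfill ((PySem.Int.toBinChars0b addr).drop 2) 36

-- int("".join(b), 2); the .getD 0 arm is Python's ValueError, excluded by Pre_v2_mask
def pvInt2 (b : List Char) : Int := (PySem.Int.ofCharsBase? b 2).getD 0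

-- one iteration of A's 'for mc, vc in zip(mask, value)' loop over the list of builds
def pvStepA (builds : List (List Char)) (mv : Char × Char) : List (List Char) :=
  if mv.1 = '0' then builds.map (fun b => b ++ [mv.2])
  else if mv.1 = '1' then builds.map (fun b => b ++ ['1'])
  else builds.map (fun b => b ++ ['0']) ++ builds.map (fun b => b ++ ['1'])

def v2_mask (mask : String) (addr : Int) : List Int :=
  let value := pvValue addr
  let builds := (mask.toList.zip value).foldl pvStepA [[]]
  builds.map pvInt2   -- the generator's yields, in order

-- ===== PORT B =====
-- one iteration of B's zip loop: extend the base bit-list, record floating positions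
def pvStepB (st : List Char × List Nat) (mv : Char × Char) : List Char × List Nat :=
  if mv.1 = '0' then (st.1 ++ [mv.2], st.2)
  else if mv.1 = '1' then (st.1 ++ ['1'], st.2)
  else (st.1 ++ ['0'], st.2 ++ [st.1.length])

-- b = list(bits); for j, pos in enumerate(floats): if (c >> j) & 1: b[pos] = "1"
-- (c and the positions are nonnegative, so the counter is a Nat and b[pos] = List.set — exact,
-- every recorded pos is a former len(bits) and stays < len(b))
def pvAsm (bits : List Char) (floats : List Nat) (c : Nat) : List Char :=
  (PySem.List.enumerate floats).foldl
    (fun b jp => if (c >>> jp.1.toNat) &&& 1 ≠ 0 then b.set jp.2 '1' else b) bits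

def v2_mask_alt (mask : String) (addr : Int) : List Int :=
  let value := pvValue addr
  let st := (mask.toList.zip value).foldl pvStepB ([], [])
  -- for c in range(1 << len(floats)): yield int("".join(b), 2)
  (List.range (1 <<< st.2.length)).map (fun c => pvInt2 (pvAsm st.1 st.2 c))

-- ===== PRECONDITION & SPEC =====
-- Pre_ excludes exactly the inputs where the Python A raises ValueError in int(..., 2): the empty
-- mask (int("", 2)), and a negative addr whose leaked 'b' char (from bin(addr)[2:]) meets a '0'
-- mask char at position 34 - log2|addr| and so survives into a build.  B raises there too.
def Pre_v2_mask (mask : String) (addr : Int) : Prop :=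
  mask ≠ "" ∧ (addr < 0 → mask.toList[34 - Nat.log2 addr.natAbs]? ≠ some '0')
instance (mask : String) (addr : Int) : Decidable (Pre_v2_mask mask addr) := by
  unfold Pre_v2_mask; infer_instance

def pvWitness_v2_mask : String × Int := ("X0X1", 5)

def Spec_v2_mask (mask : String) (addr : Int) (out : List Int) : Prop := out = v2_mask_alt mask addr
instance (mask : String) (addr : Int) (out : List Int) : Decidable (Spec_v2_mask mask addr out) := by unfold Spec_v2_mask; infer_instance

-- ===== CLAIM (what is proved, stated in full; the proofs are below) =====
def Claim_equal_v2_mask : Prop := ∀ (mask : String) (addr : Int), Dom_v2_mask mask addr → Pre_v2_mask mask addr → Spec_v2_mask mask addr (v2_mask mask addr)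

-- ===== LEMMAS AND PROOFS =====

-- the step of B's inner loop, at a fixed counter c
def pvSet (c : Nat) (b : List Char) (jp : Int × Nat) : List Char :=
  if (c >>> jp.1.toNat) &&& 1 ≠ 0 then b.set jp.2 '1' else b

theorem pvAsm_eq (bits : List Char) (floats : List Nat) (c : Nat) :
    pvAsm bits floats c = (PySem.List.enumerate floats).foldl (pvSet c) bits := rfl

theorem pvBit_eq (c j : Nat) : (c >>> j) &&& 1 = if c.testBit j then 1 else 0 := by
  rw [Nat.and_one_is_mod, Nat.testBit_eq_decide_div_mod_eq, Nat.shiftRight_eq_div_pow]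
  rcases Nat.mod_two_eq_zero_or_one (c / 2 ^ j) with h | h <;> simp [h]

theorem pvFold_length (c : Nat) (ps : List (Int × Nat)) :
    ∀ bits : List Char, (ps.foldl (pvSet c) bits).length = bits.length := by
  induction ps with
  | nil => intro bits; rfl
  | cons jp ps ih =>
    intro bits
    rw [List.foldl_cons, ih]
    unfold pvSet; split <;> simp

theorem pvAsm_length (bits : List Char) (floats : List Nat) (c : Nat) :
    (pvAsm bits floats c).length = bits.length := pvFold_length c _ bits

theorem pvFold_append (c : Nat) (ps : List (Int × Nat)) :
    ∀ (bits : List Char) (d : Char), (∀ p ∈ ps, p.2 < bits.length) →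
    ps.foldl (pvSet c) (bits ++ [d]) = ps.foldl (pvSet c) bits ++ [d] := by
  induction ps with
  | nil => intro bits d _; rfl
  | cons jp ps ih =>
    intro bits d h
    rw [List.foldl_cons, List.foldl_cons]
    have hjp : jp.2 < bits.length := h jp (List.mem_cons_self ..)
    by_cases hb : (c >>> jp.1.toNat) &&& 1 ≠ 0
    · have e1 : pvSet c (bits ++ [d]) jp = bits.set jp.2 '1' ++ [d] := by
        unfold pvSet; rw [if_pos hb]; exact List.set_append_left _ _ hjp
      have e2 : pvSet c bits jp = bits.set jp.2 '1' := by unfold pvSet; rw [if_pos hb]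
      rw [e1, e2]
      exact ih (bits.set jp.2 '1') d
        (fun p hp => by rw [List.length_set]; exact h p (List.mem_cons_of_mem _ hp))
    · have e1 : pvSet c (bits ++ [d]) jp = bits ++ [d] := by unfold pvSet; rw [if_neg hb]
      have e2 : pvSet c bits jp = bits := by unfold pvSet; rw [if_neg hb]
      rw [e1, e2]
      exact ih bits d (fun p hp => h p (List.mem_cons_of_mem _ hp))

theorem pvAsm_append (bits : List Char) (floats : List Nat) (c : Nat) (d : Char)
    (h : ∀ p ∈ floats, p < bits.length) :
    pvAsm (bits ++ [d]) floats c = pvAsm bits floats c ++ [d] := by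
  rw [pvAsm_eq, pvAsm_eq]
  apply pvFold_append
  intro p hp
  obtain ⟨k, hk, rfl⟩ := (PySem.List.mem_enumerate_iff floats 0 p).1 hp
  exact h _ (List.getElem_mem hk)

theorem pvAsm_congr (bits : List Char) (floats : List Nat) (c1 c2 : Nat)
    (h : ∀ j < floats.length, c1.testBit j = c2.testBit j) :
    pvAsm bits floats c1 = pvAsm bits floats c2 := by
  rw [pvAsm_eq, pvAsm_eq]
  apply PySem.List.foldl_congr_mem
  intro b jp hjp
  obtain ⟨k, hk, rfl⟩ := (PySem.List.mem_enumerate_iff floats 0 jp).1 hjp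
  have : ((0 : Int) + (k : Int)).toNat = k := by omega
  unfold pvSet
  rw [this, pvBit_eq, pvBit_eq, h k hk]

theorem pvAsm_tail (bits : List Char) (floats : List Nat) (q : Nat) (c : Nat) :
    pvAsm bits (floats ++ [q]) c
      = pvSet c (pvAsm bits floats c) ((floats.length : Int), q) := by
  rw [pvAsm_eq, pvAsm_eq]
  rw [PySem.List.enumerate_append, List.foldl_append]
  simp [List.foldl_cons]

theorem pvAsm_low (bits : List Char) (floats : List Nat) (c : Nat)
    (hc : c < 2 ^ floats.length) (h : ∀ p ∈ floats, p < bits.length) :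
    pvAsm (bits ++ ['0']) (floats ++ [bits.length]) c = pvAsm bits floats c ++ ['0'] := by
  rw [pvAsm_tail]
  have hcond : ¬ ((c >>> ((floats.length : Int)).toNat) &&& 1 ≠ 0) := by
    rw [Int.toNat_natCast, Nat.and_one_is_mod, Nat.shiftRight_eq_div_pow, Nat.div_eq_of_lt hc]
    simp
  unfold pvSet
  rw [if_neg hcond]
  exact pvAsm_append bits floats c '0' h

theorem pvAsm_high (bits : List Char) (floats : List Nat) (c : Nat)
    (hc : c < 2 ^ floats.length) (h : ∀ p ∈ floats, p < bits.length) :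
    pvAsm (bits ++ ['0']) (floats ++ [bits.length]) (2 ^ floats.length + c)
      = pvAsm bits floats c ++ ['1'] := by
  rw [pvAsm_tail]
  have hone : ((2 ^ floats.length + c) >>> ((floats.length : Int)).toNat) &&& 1 ≠ 0 := by
    rw [Int.toNat_natCast, Nat.and_one_is_mod, Nat.shiftRight_eq_div_pow, Nat.add_comm,
      Nat.add_div_right _ (pow_pos (by norm_num) _), Nat.div_eq_of_lt hc]
    simp
  have hcongr : pvAsm (bits ++ ['0']) floats (2 ^ floats.length + c)
      = pvAsm (bits ++ ['0']) floats c := by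
    apply pvAsm_congr
    intro j hj
    exact Nat.testBit_two_pow_add_gt hj c
  unfold pvSet
  rw [if_pos hone, hcongr, pvAsm_append bits floats c '0' h]
  have hlen : bits.length = (pvAsm bits floats c).length := (pvAsm_length ..).symm
  rw [hlen, List.set_append_right _ _ (le_refl _)]
  simp

theorem pv_main (l : List (Char × Char)) :
    ∀ (bits : List Char) (floats : List Nat), (∀ p ∈ floats, p < bits.length) →
    l.foldl pvStepA ((List.range (1 <<< floats.length)).map (pvAsm bits floats))
      = (fun st => (List.range (1 <<< st.2.length)).map (pvAsm st.1 st.2))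
          (l.foldl pvStepB (bits, floats)) := by
  induction l with
  | nil => intro bits floats _; rfl
  | cons mv l ih =>
    intro bits floats h
    rw [List.foldl_cons, List.foldl_cons]
    by_cases h0 : mv.1 = '0'
    · have hA : pvStepA ((List.range (1 <<< floats.length)).map (pvAsm bits floats)) mv
          = (List.range (1 <<< floats.length)).map (pvAsm (bits ++ [mv.2]) floats) := by
        unfold pvStepA
        rw [if_pos h0, List.map_map]
        exact List.map_congr_left (fun c _ => (pvAsm_append bits floats c mv.2 h).symm)
      have hB : pvStepB (bits, floats) mv = (bits ++ [mv.2], floats) := by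
        unfold pvStepB; rw [if_pos h0]
      rw [hA, hB]
      exact ih (bits ++ [mv.2]) floats (fun p hp => by simpa using Nat.lt_succ_of_lt (by simpa using h p hp))
    · by_cases h1 : mv.1 = '1'
      · have hA : pvStepA ((List.range (1 <<< floats.length)).map (pvAsm bits floats)) mv
            = (List.range (1 <<< floats.length)).map (pvAsm (bits ++ ['1']) floats) := by
          unfold pvStepA
          rw [if_neg h0, if_pos h1, List.map_map]
          exact List.map_congr_left (fun c _ => (pvAsm_append bits floats c '1' h).symm)
        have hB : pvStepB (bits, floats) mv = (bits ++ ['1'], floats) := by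
          unfold pvStepB; rw [if_neg h0, if_pos h1]
        rw [hA, hB]
        exact ih (bits ++ ['1']) floats (fun p hp => by simpa using Nat.lt_succ_of_lt (by simpa using h p hp))
      · have hA : pvStepA ((List.range (1 <<< floats.length)).map (pvAsm bits floats)) mv
            = (List.range (1 <<< (floats ++ [bits.length]).length)).map
                (pvAsm (bits ++ ['0']) (floats ++ [bits.length])) := by
          unfold pvStepA
          rw [if_neg h0, if_neg h1]
          have hlen : (floats ++ [bits.length]).length = floats.length + 1 := by simp
          rw [hlen, Nat.one_shiftLeft, Nat.one_shiftLeft, pow_succ, mul_two, List.range_add,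
            List.map_append, List.map_map, List.map_map, List.map_map]
          congr 1
          · exact List.map_congr_left (fun c hc =>
              (pvAsm_low bits floats c (List.mem_range.1 hc) h).symm)
          · exact List.map_congr_left (fun c hc => by
              have := pvAsm_high bits floats c (List.mem_range.1 hc) h
              simp only [Function.comp_apply]
              rw [← this])
        have hB : pvStepB (bits, floats) mv = (bits ++ ['0'], floats ++ [bits.length]) := by
          unfold pvStepB; rw [if_neg h0, if_neg h1]
        rw [hA, hB]
        apply ih (bits ++ ['0']) (floats ++ [bits.length])
        intro p hp
        rcases List.mem_append.1 hp with hp | hp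
        · simpa using Nat.lt_succ_of_lt (by simpa using h p hp)
        · simp at hp; simp [hp]

-- ===== VERDICT (by name: the statement is the Claim_ definition above) =====
theorem v2_mask_spec : Claim_equal_v2_mask := by
  intro mask addr _ _
  unfold Spec_v2_mask v2_mask v2_mask_alt
  have h := pv_main (mask.toList.zip (pvValue addr)) [] [] (by simp)
  simp only [List.length_nil] at h
  have h0 : (List.range (1 <<< 0)).map (pvAsm [] []) = [[]] := rfl
  rw [h0] at h
  show (List.foldl pvStepA [[]] (mask.toList.zip (pvValue addr))).map pvInt2
      = (List.range (1 <<< (List.foldl pvStepB ([], []) (mask.toList.zip (pvValue addr))).2.length)).map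
          (fun c => pvInt2 (pvAsm (List.foldl pvStepB ([], []) (mask.toList.zip (pvValue addr))).1
            (List.foldl pvStepB ([], []) (mask.toList.zip (pvValue addr))).2 c))
  rw [h, List.map_map]
  rfl
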